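-- pv_equiv track=rewrite | github.com/Sagiri777/astrbot_plugin_pixivdirect | commands.py | _split_keyword_and_options
-- ===== SOURCE A (Python) =====
-- def _split_keyword_and_options(tokens: list[str]) -> tuple[str, list[str]]:
--     keyword_parts: list[str] = []
--     option_tokens: list[str] = []
--     seen_option = False
--
--     for token in tokens:
--         if "=" in token:
--             seen_option = True
--         if seen_option:
--             option_tokens.append(token)
--         else:
--             keyword_parts.append(token)
--
--     return " ".join(keyword_parts).strip(), option_tokens
-- ===== SOURCE B (Python) =====
-- def _split_keyword_and_options(tokens: list[str]) -> tuple[str, list[str]]: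
--     i = next((j for j, t in enumerate(tokens) if "=" in t), len(tokens))
--     return " ".join(tokens[:i]).strip(), tokens[i:]
-- ===== Notes on version B (the rewrite author's own statement) =====
-- stated objective: simpler
-- what changed: B finds the index of the first token containing '=' and returns two slices, replacing A's flag-driven per-token accumulation into two lists.
import Mathlib
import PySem

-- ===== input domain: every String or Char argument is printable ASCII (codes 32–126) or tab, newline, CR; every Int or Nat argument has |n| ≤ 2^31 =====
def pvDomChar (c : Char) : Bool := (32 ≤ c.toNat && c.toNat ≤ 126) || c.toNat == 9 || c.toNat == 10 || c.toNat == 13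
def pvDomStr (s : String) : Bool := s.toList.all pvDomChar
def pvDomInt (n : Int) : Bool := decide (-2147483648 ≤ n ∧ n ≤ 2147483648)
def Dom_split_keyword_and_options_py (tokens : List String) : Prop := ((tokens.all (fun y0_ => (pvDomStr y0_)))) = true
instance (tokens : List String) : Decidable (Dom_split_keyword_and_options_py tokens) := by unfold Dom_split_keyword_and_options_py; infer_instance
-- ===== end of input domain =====

-- B locates the first '='-bearing token's index and slices, instead of A's flag-driven
-- two-list accumulation; objective: simpler. Equivalence proved on all inputs.

-- ===== PORT A =====
-- the loop body; state: (keyword_parts, option_tokens, seen_option)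
def pvStepA (st : List String × List String × Bool) (token : String) :
    List String × List String × Bool :=
  let seen := if PySem.Str.isIn "=" token then true else st.2.2
  if seen then (st.1, st.2.1 ++ [token], seen) else (st.1 ++ [token], st.2.1, seen)

def split_keyword_and_options_py (tokens : List String) : String × List String :=
  let st := tokens.foldl pvStepA ([], [], false)
  (PySem.Str.strip (PySem.Str.join " " st.1), st.2.1)

-- ===== PORT B =====
-- i = next((j for j, t in enumerate(tokens) if "=" in t), len(tokens)) — this is List.findIdx
def split_keyword_and_options_py_alt (tokens : List String) : String × List String :=
  let i := tokens.findIdx (fun t => PySem.Str.isIn "=" t)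
  (PySem.Str.strip (PySem.Str.join " " (tokens.take i)), tokens.drop i)

-- ===== PRECONDITION & SPEC =====
def Spec_split_keyword_and_options_py (tokens : List String) (out : String × List String) : Prop := out = split_keyword_and_options_py_alt tokens
instance (tokens : List String) (out : String × List String) : Decidable (Spec_split_keyword_and_options_py tokens out) := by unfold Spec_split_keyword_and_options_py; infer_instance

-- ===== CLAIM (what is proved, stated in full; the proofs are below) =====
def Claim_equal_split_keyword_and_options_py : Prop := ∀ (tokens : List String), Dom_split_keyword_and_options_py tokens → Spec_split_keyword_and_options_py tokens (split_keyword_and_options_py tokens)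

-- ===== LEMMAS AND PROOFS =====

-- once seen_option is true, every remaining token goes to option_tokens
lemma pvLoopA_seen (tokens : List String) (kw opts : List String) :
    tokens.foldl pvStepA (kw, opts, true) = (kw, opts ++ tokens, true) := by
  induction tokens generalizing opts with
  | nil => simp
  | cons t ts ih => simp [pvStepA, ih]

-- while seen_option is false, the loop computes take/drop at the first '='-bearing token
lemma pvLoopA_unseen (tokens : List String) (kw : List String) :
    tokens.foldl pvStepA (kw, [], false) =
      (kw ++ tokens.take (tokens.findIdx (fun t => PySem.Str.isIn "=" t)),
       tokens.drop (tokens.findIdx (fun t => PySem.Str.isIn "=" t)), false) ∨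
    tokens.foldl pvStepA (kw, [], false) =
      (kw ++ tokens.take (tokens.findIdx (fun t => PySem.Str.isIn "=" t)),
       tokens.drop (tokens.findIdx (fun t => PySem.Str.isIn "=" t)), true) := by
  induction tokens generalizing kw with
  | nil => left; simp
  | cons t ts ih =>
    by_cases h : PySem.Str.isIn "=" t
    · right
      have h2 : PySem.Chars.isIn ['='] t.toList = true := by simpa using h
      rw [List.foldl_cons,
        show pvStepA (kw, [], false) t = (kw, [t], true) by simp [pvStepA, h2],
        pvLoopA_seen]
      simp [List.findIdx_cons, h2]
    · have h2 : PySem.Chars.isIn ['='] t.toList = false := by simpa using h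
      rcases ih (kw ++ [t]) with h' | h' <;> [left; right] <;>
        rw [List.foldl_cons,
          show pvStepA (kw, [], false) t = (kw ++ [t], [], false) by simp [pvStepA, h2],
          h'] <;>
        simp [List.findIdx_cons, h2]

-- ===== VERDICT (by name: the statement is the Claim_ definition above) =====
theorem split_keyword_and_options_py_spec : Claim_equal_split_keyword_and_options_py := by
  intro tokens _
  unfold Spec_split_keyword_and_options_py split_keyword_and_options_py split_keyword_and_options_py_alt
  rcases pvLoopA_unseen tokens [] with h | h <;> rw [h] <;> simp
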